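-- pv_equiv track=rewrite | github.com/Lerskk/ProgrammingII-C | theory/codigo.py | verificarGanadores
-- ===== SOURCE A (Python) =====
-- def verificarGanadoresLista(lista):
--     # Inicializar diccionario
--     ganadores = {
--         "0": 0,
--         "1": 0
--     }
--
--     jugadorAnterior = None
--     cantidad = 0
--     for casilla in lista:
--         if casilla != jugadorAnterior: # Dado que las 4 o mas fichas deben estar en forma consecutiva, si cambia el jugador de una casilla a la siguiente, reiniciamos el conteo
--             cantidad = 0
--             jugadorAnterior = casilla
--         cantidad += 1
--
--         if cantidad == 4: # Si se encontraron 4 fichas seguidas del mismo jugador, significa que gano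
--             ganadores[casilla] += 1
--
--     return ganadores
--
-- def obtenerColumnas(tablero, tamanio):
--     columnas = []
--
--     for nroColumna in range(tamanio-1): # Recorrer por columnas
--         columna = []
--         for nroFila in range(tamanio): # Recorrer filas
--             columna.append(tablero[nroFila][nroColumna]) # Agregar cada casilla de la columna a una lista
--         columnas.append(columna) # Agregar cada columna a la lista de columnas
--
--     return columnas
--
-- def obtenerDiagonales(tablero, tamanio):
--     diagonales = []
--
--     # Recorrer filas empezando desde filas negativas. Esto sirve para alcanzar todas las diagonales del tablero, ya que la variable filaInicial se refiere a la fila de la casilla en la que empieza la diagonal (casilla pegada a un borde), pero no siempre esta dento del tablero. Por ejemplo, si tomamos en cuenta en el siguiente tablero formado unicamente por las letras mayusculas (las minusculas son para referencia nada mas), si yo quisiera obtener la diagonal ["B", "F"], la puedo pensar como la diagonal ["m", "B", "F"] (sacando la "m"), que empieza en la fila -1: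
--     # Fila -1: m n o
--     # Fila  0: A B C
--     # Fila  1: D E F
--     # Fila  2: G H I
--     # Fila  3: J K L
--     for filaIncial in range(-(tamanio-2), tamanio):
--         # Diagonal hacia abajo a la derecha
--         diagonal = []
--         fila = filaIncial
--         columna = 0 # Empezar desde la izquierda
--         while fila < tamanio and columna < tamanio-1: # Mientras no se salga de los bordes del tablero
--             if (fila >= 0): # Si la casilla esta realmente dentro del tablero, agregarla a la diagonal
--                 diagonal.append(tablero[fila][columna])
--             fila += 1 # Recorrer hacia abajo
--             columna += 1 # Recorrer hacia la izquierda
--         diagonales.append(diagonal) # Agregar diagonal resultante a la lista de diagonales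
--
--         # Diagonal hacia abajo a la izquierda
--         diagonal = []
--         fila = filaIncial
--         columna = tamanio - 2 # Empezar desde la derecha
--         while fila < tamanio and columna >= 0: # Mientras no se salga de los bordes del tablero
--             if (fila >= 0): # Si la casilla esta realmente dentro del tablero, agregarla a la diagonal
--                 diagonal.append(tablero[fila][columna])
--             fila += 1 # Recorrer hacia abajo
--             columna -= 1 # Recorrer hacia la izquierda
--         diagonales.append(diagonal) # Agregar diagonal resultante a la lista de diagonales
--
--     return diagonales
--
-- def verificarGanadores(tablero, tamanio):
--     # Inicializar diccionario
--     ganadores = {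
--         "0": 0,
--         "1": 0
--     }
--
--     for fila in tablero: # Verificar cada fila
--         ganadoresFila = verificarGanadoresLista(fila)
--         # Sumar ganadores de la fila al diccionario general
--         ganadores["0"] += ganadoresFila["0"]
--         ganadores["1"] += ganadoresFila["1"]
--
--     for columna in obtenerColumnas(tablero, tamanio): # Verificar cada columna
--         ganadoresColumna = verificarGanadoresLista(columna)
--         # Sumar ganadores de la columna al diccionario general
--         ganadores["0"] += ganadoresColumna["0"]
--         ganadores["1"] += ganadoresColumna["1"]
--
--     for diagonal in obtenerDiagonales(tablero, tamanio): # Verificar cada diagonal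
--         ganadoresDiagonal = verificarGanadoresLista(diagonal)
--         # Sumar ganadores de la diagonal al diccionario general
--         ganadores["0"] += ganadoresDiagonal["0"]
--         ganadores["1"] += ganadoresDiagonal["1"]
--
--     return ganadores
-- ===== SOURCE B (Python) =====
-- def _contar(cells):
--     # run counter: a win is counted exactly when a player's consecutive count reaches 4
--     ceros = 0
--     unos = 0
--     anterior = None
--     cantidad = 0
--     for c in cells:
--         if c != anterior:
--             cantidad = 0
--             anterior = c
--         cantidad += 1
--         if cantidad == 4:
--             if c == "0":
--                 ceros += 1
--             elif c == "1":
--                 unos += 1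
--     return ceros, unos
--
--
-- def verificarGanadores(tablero, tamanio):
--     ceros = 0
--     unos = 0
--
--     # rows
--     for fila in tablero:
--         a, b = _contar(fila)
--         ceros += a
--         unos += b
--
--     # columns
--     for columna in range(tamanio - 1):
--         a, b = _contar([tablero[f][columna] for f in range(tamanio)])
--         ceros += a
--         unos += b
--
--     # diagonals: one cell-major pass filling dict buckets (down-right diagonals keyed
--     # by f - c, down-left ones by f + c, rows in increasing order), then run-count each bucket
--     dr = {}
--     dl = {}
--     for f in range(tamanio):
--         for c in range(tamanio - 1):
--             dr.setdefault(f - c, []).append(tablero[f][c])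
--             dl.setdefault(f + c, []).append(tablero[f][c])
--     for bucket in dr.values():
--         a, b = _contar(bucket)
--         ceros += a
--         unos += b
--     for bucket in dl.values():
--         a, b = _contar(bucket)
--         ceros += a
--         unos += b
--
--     return {"0": ceros, "1": unos}
-- ===== Notes on version B (the rewrite author's own statement) =====
-- stated objective: alternative
-- what changed: B replaces A's per-line winner dicts by a pair of integer accumulators and, instead of A's per-start-row marching while-loops for diagonals, collects the diagonals in one cell-major pass into dict buckets keyed by fila-columna (down-right) and fila+columna (down-left), then run-counts each bucket.
import Mathlib
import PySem

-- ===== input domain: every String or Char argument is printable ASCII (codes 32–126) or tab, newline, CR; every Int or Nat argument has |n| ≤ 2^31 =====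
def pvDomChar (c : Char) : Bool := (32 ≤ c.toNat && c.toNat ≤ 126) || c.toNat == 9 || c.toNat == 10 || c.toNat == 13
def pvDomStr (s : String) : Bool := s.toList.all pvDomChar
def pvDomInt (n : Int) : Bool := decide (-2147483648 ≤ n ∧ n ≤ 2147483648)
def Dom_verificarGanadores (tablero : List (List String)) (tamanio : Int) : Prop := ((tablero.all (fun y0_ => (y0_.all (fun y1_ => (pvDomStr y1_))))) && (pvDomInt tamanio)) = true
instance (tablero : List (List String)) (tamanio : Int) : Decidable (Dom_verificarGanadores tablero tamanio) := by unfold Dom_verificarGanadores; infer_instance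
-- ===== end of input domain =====

-- B re-groups the diagonals of A's marching while-loops into dict buckets built in one
-- cell-major pass and replaces A's per-line dicts by a pair of integer accumulators;
-- return value equivalence on all inputs where the Python A returns (Pre_ excludes exactly
-- A's IndexError/KeyError crashes).

-- shared cell access: tablero[fila][columna]; exact wherever the indices are in range
-- (Pre_verificarGanadores guarantees that on every access either port performs)
def pyCell (tablero : List (List String)) (fila columna : Int) : String :=
  (PySem.List.pyGet? ((PySem.List.pyGet? tablero fila).getD []) columna).getD ""

-- ===== PORT A =====

-- one step of verificarGanadoresLista's loop; `insert … (getD … + 1)` stands for Python's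
-- `ganadores[casilla] += 1` (the KeyError case is excluded by Pre_verificarGanadores)
def vglStep (st : PySem.Dict String Int × Option String × Int) (casilla : String) :
    PySem.Dict String Int × Option String × Int :=
  let g := st.1
  let prev := st.2.1
  let cant := st.2.2
  let pc := if some casilla ≠ prev then (some casilla, (0 : Int)) else (prev, cant)
  let cant := pc.2 + 1
  if cant = 4 then (g.insert casilla (g.getD casilla 0 + 1), pc.1, cant)
  else (g, pc.1, cant)

def verificarGanadoresLista (lista : List String) : PySem.Dict String Int :=
  (lista.foldl vglStep (PySem.Dict.ofList [("0", 0), ("1", 0)], none, 0)).1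

def obtenerColumnas (tablero : List (List String)) (tamanio : Int) : List (List String) :=
  (PySem.List.pyRange 0 (tamanio - 1) 1).foldl
    (fun columnas nroColumna =>
      columnas ++ [(PySem.List.pyRange 0 tamanio 1).foldl
        (fun columna nroFila => columna ++ [pyCell tablero nroFila nroColumna]) []])
    []

-- the down-right while loop of obtenerDiagonales
def diagDRA (tablero : List (List String)) (tamanio fila columna : Int)
    (diagonal : List String) : List String :=
  if _h : fila < tamanio ∧ columna < tamanio - 1 then
    diagDRA tablero tamanio (fila + 1) (columna + 1)
      (diagonal ++ if 0 ≤ fila then [pyCell tablero fila columna] else [])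
  else diagonal
termination_by (tamanio - fila).toNat
decreasing_by omega

-- the down-left while loop of obtenerDiagonales
def diagDLA (tablero : List (List String)) (tamanio fila columna : Int)
    (diagonal : List String) : List String :=
  if _h : fila < tamanio ∧ 0 ≤ columna then
    diagDLA tablero tamanio (fila + 1) (columna - 1)
      (diagonal ++ if 0 ≤ fila then [pyCell tablero fila columna] else [])
  else diagonal
termination_by (tamanio - fila).toNat
decreasing_by omega

def obtenerDiagonales (tablero : List (List String)) (tamanio : Int) : List (List String) :=
  (PySem.List.pyRange (-(tamanio - 2)) tamanio 1).foldl
    (fun diagonales filaInicial =>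
      diagonales ++ [diagDRA tablero tamanio filaInicial 0 []]
        ++ [diagDLA tablero tamanio filaInicial (tamanio - 2) []])
    []

-- ganadores["0"] += otros["0"]; ganadores["1"] += otros["1"]  (both keys always present)
def addWinners (g otros : PySem.Dict String Int) : PySem.Dict String Int :=
  let g := g.insert "0" (g.getD "0" 0 + otros.getD "0" 0)
  g.insert "1" (g.getD "1" 0 + otros.getD "1" 0)

def verificarGanadores (tablero : List (List String)) (tamanio : Int) : List (String × Int) :=
  let g := PySem.Dict.ofList [("0", (0 : Int)), ("1", 0)]
  let g := tablero.foldl (fun g fila => addWinners g (verificarGanadoresLista fila)) g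
  let g := (obtenerColumnas tablero tamanio).foldl
    (fun g columna => addWinners g (verificarGanadoresLista columna)) g
  let g := (obtenerDiagonales tablero tamanio).foldl
    (fun g diagonal => addWinners g (verificarGanadoresLista diagonal)) g
  g.items

-- ===== PORT B =====

-- one step of _contar's loop
def contarStep (st : (Int × Int) × Option String × Int) (c : String) :
    (Int × Int) × Option String × Int :=
  let zo := st.1
  let prev := st.2.1
  let cant := st.2.2
  let pc := if some c ≠ prev then (some c, (0 : Int)) else (prev, cant)
  let cant := pc.2 + 1
  let zo := if cant = 4 then
      (if c = "0" then (zo.1 + 1, zo.2) else if c = "1" then (zo.1, zo.2 + 1) else zo)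
    else zo
  (zo, pc.1, cant)

def contar (cells : List String) : Int × Int :=
  (cells.foldl contarStep ((0, 0), none, 0)).1

def verificarGanadores_alt (tablero : List (List String)) (tamanio : Int) :
    List (String × Int) :=
  let zo : Int × Int := tablero.foldl
    (fun p fila => let r := contar fila; (p.1 + r.1, p.2 + r.2)) (0, 0)
  let zo := (PySem.List.pyRange 0 (tamanio - 1) 1).foldl
    (fun p columna =>
      let r := contar ((PySem.List.pyRange 0 tamanio 1).map (fun f => pyCell tablero f columna))
      (p.1 + r.1, p.2 + r.2)) zo
  -- dr.setdefault(f - c, []).append(x) / dl.setdefault(f + c, []).append(x)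
  let buckets := (PySem.List.pyRange 0 tamanio 1).foldl
    (fun (bs : PySem.Dict Int (List String) × PySem.Dict Int (List String)) f =>
      (PySem.List.pyRange 0 (tamanio - 1) 1).foldl
        (fun bs c =>
          (bs.1.modify (f - c) [] (· ++ [pyCell tablero f c]),
           bs.2.modify (f + c) [] (· ++ [pyCell tablero f c]))) bs)
    (PySem.Dict.empty, PySem.Dict.empty)
  let zo := buckets.1.values.foldl
    (fun p b => let r := contar b; (p.1 + r.1, p.2 + r.2)) zo
  let zo := buckets.2.values.foldl
    (fun p b => let r := contar b; (p.1 + r.1, p.2 + r.2)) zo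
  [("0", zo.1), ("1", zo.2)]

-- ===== PRECONDITION & SPEC =====

def esBin (c : String) : Bool := c == "0" || c == "1"

-- four consecutive equal cells whose value is neither "0" nor "1" (Python A raises KeyError there)
def badRunF : List String → Bool
  | a :: b :: c :: d :: r => (a == b && b == c && c == d && !esBin a) || badRunF (b :: c :: d :: r)
  | _ => false

def colLine (tablero : List (List String)) (tamanio c : Int) : List String :=
  (PySem.List.pyRange 0 tamanio 1).map (fun f => pyCell tablero f c)

def canonDR (tablero : List (List String)) (tamanio d : Int) : List String :=
  (PySem.List.pyRange (max d 0) (min tamanio (d + tamanio - 1)) 1).map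
    (fun f => pyCell tablero f (f - d))

def canonDL (tablero : List (List String)) (tamanio d : Int) : List String :=
  (PySem.List.pyRange (max d 0) (min tamanio (d + tamanio - 1)) 1).map
    (fun f => pyCell tablero f (tamanio - 2 - (f - d)))

-- Pre_ holds exactly where Python A RETURNS: it excludes boards too small for the
-- column/diagonal indexing (IndexError) and boards where some scanned row, column or
-- diagonal has four consecutive equal cells other than "0"/"1" (KeyError).
def Pre_verificarGanadores (tablero : List (List String)) (tamanio : Int) : Prop :=
  (∀ row ∈ tablero, badRunF row = false) ∧
  (if 2 ≤ tamanio then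
    (if tamanio ≤ (tablero.length : Int) ∧
        ∀ row ∈ tablero.take tamanio.toNat, tamanio - 1 ≤ (row.length : Int) then
      (∀ c ∈ PySem.List.pyRange 0 (tamanio - 1) 1, badRunF (colLine tablero tamanio c) = false) ∧
      (∀ d ∈ PySem.List.pyRange (-(tamanio - 2)) tamanio 1,
        badRunF (canonDR tablero tamanio d) = false ∧ badRunF (canonDL tablero tamanio d) = false)
    else False)
  else True)

instance (tablero : List (List String)) (tamanio : Int) :
    Decidable (Pre_verificarGanadores tablero tamanio) := by
  unfold Pre_verificarGanadores; infer_instance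

def pvWitness_verificarGanadores : List (List String) × Int :=
  ([["0", "1", "0"], ["1", "0", "1"], ["0", "1", "0"]], 3)

def Spec_verificarGanadores (tablero : List (List String)) (tamanio : Int)
    (out : List (String × Int)) : Prop := out = verificarGanadores_alt tablero tamanio

instance (tablero : List (List String)) (tamanio : Int) (out : List (String × Int)) :
    Decidable (Spec_verificarGanadores tablero tamanio out) := by
  unfold Spec_verificarGanadores; infer_instance

-- ===== CLAIM (what is proved, stated in full; the proofs are below) =====
def Claim_equal_verificarGanadores : Prop := ∀ (tablero : List (List String)) (tamanio : Int), Dom_verificarGanadores tablero tamanio → Pre_verificarGanadores tablero tamanio → Spec_verificarGanadores tablero tamanio (verificarGanadores tablero tamanio)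

-- ===== LEMMAS AND PROOFS =====

-- ---- counter equivalence ----

def esBinO : Option String → Bool
  | some c => esBin c
  | none => false

def runLenO (p : Option String) : List String → Nat
  | [] => 0
  | c :: r => if some c = p then runLenO p r + 1 else 0

theorem runLenO_le_length (p : Option String) (l : List String) :
    runLenO p l ≤ l.length := by
  induction l with
  | nil => simp [runLenO]
  | cons c r ih => simp only [runLenO]; split <;> simp <;> omega

theorem badRun_tail {x : String} {xs : List String} (h : badRunF (x :: xs) = false) :
    badRunF xs = false := by
  match xs with
  | [] => rfl
  | [a] => rfl
  | [a, b] => rfl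
  | a :: b :: c :: r =>
    rw [badRunF] at h
    exact (Bool.or_eq_false_iff.mp h).2

theorem badRun_of_run3 {c : String} {rest : List String}
    (h3 : 3 ≤ runLenO (some c) rest) (hb : esBin c = false) :
    badRunF (c :: rest) = true := by
  rcases rest with _ | ⟨x1, _ | ⟨x2, _ | ⟨x3, r⟩⟩⟩
  · simp [runLenO] at h3
  · have := runLenO_le_length (some c) [x1]; simp at this; omega
  · have := runLenO_le_length (some c) [x1, x2]; simp at this; omega
  ·
    simp only [runLenO] at h3
    split at h3
    case isFalse => omega
    case isTrue h1 =>
      split at h3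
      case isFalse => omega
      case isTrue h2 =>
        split at h3
        case isFalse => omega
        case isTrue h3' =>
          have e1 : x1 = c := by injection h1
          have e2 : x2 = c := by injection h2
          have e3 : x3 = c := by injection h3'
          subst e1; subst e2; subst e3
          simp [badRunF, hb]

theorem contarStep_shift (a b : Int) (p : Option String) (k : Int) (c : String) :
    contarStep ((a, b), p, k) c
      = ((a + (contarStep ((0, 0), p, k) c).1.1, b + (contarStep ((0, 0), p, k) c).1.2),
         (contarStep ((0, 0), p, k) c).2) := by
  simp only [contarStep]
  split_ifs <;> simp

theorem contar_shift (l : List String) (a b : Int) (p : Option String) (k : Int) :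
    l.foldl contarStep ((a, b), p, k)
      = ((a + (l.foldl contarStep ((0, 0), p, k)).1.1,
          b + (l.foldl contarStep ((0, 0), p, k)).1.2),
         (l.foldl contarStep ((0, 0), p, k)).2) := by
  induction l generalizing a b p k with
  | nil => simp
  | cons c l ih =>
    simp only [List.foldl_cons]
    rcases hst : contarStep ((0, 0), p, k) c with ⟨⟨d1, d2⟩, p', k'⟩
    rw [contarStep_shift, hst]
    rw [ih (a + d1) (b + d2) p' k', ih d1 d2 p' k']
    simp [add_assoc]

theorem counter_fold (l : List String) (z o : Int) (p : Option String) (k : Int)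
    (hbr : badRunF l = false)
    (hinv : esBinO p = true ∨ k + (runLenO p l : Int) < 4) :
    l.foldl vglStep (PySem.Dict.ofList [("0", z), ("1", o)], p, k)
      = (PySem.Dict.ofList [("0", z + (l.foldl contarStep ((0, 0), p, k)).1.1),
                            ("1", o + (l.foldl contarStep ((0, 0), p, k)).1.2)],
         (l.foldl contarStep ((0, 0), p, k)).2) := by
  induction l generalizing z o p k with
  | nil => simp
  | cons c l ih =>
    simp only [List.foldl_cons]
    have hbr' : badRunF l = false := badRun_tail hbr
    by_cases hne : some c ≠ p
    · -- player change: counters reset, cantidad becomes 1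
      have ea : vglStep (PySem.Dict.ofList [("0", z), ("1", o)], p, k) c
          = (PySem.Dict.ofList [("0", z), ("1", o)], some c, 1) := by
        simp [vglStep, hne]
      have eb : contarStep ((0, 0), p, k) c = ((0, 0), some c, 1) := by
        simp [contarStep, hne]
      have hinv' : esBinO (some c) = true ∨ (1 : Int) + (runLenO (some c) l : Int) < 4 := by
        by_cases hbin : esBin c = true
        · exact Or.inl (by simpa [esBinO] using hbin)
        · right
          by_contra hge
          have h3 : 3 ≤ runLenO (some c) l := by omega
          have := badRun_of_run3 h3 (by simpa using hbin)
          rw [this] at hbr; exact absurd hbr (by simp)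
      rw [ea, eb, ih z o (some c) 1 hbr' hinv']
    · -- same player
      rw [not_ne_iff] at hne
      subst hne
      have hrun : runLenO (some c) (c :: l) = runLenO (some c) l + 1 := by
        simp [runLenO]
      by_cases h4 : k + 1 = 4
      · -- cantidad reaches 4: the cell must be "0" or "1"
        have hk : k = 3 := by omega
        subst hk
        have hbin : esBin c = true := by
          rcases hinv with h | h
          · simpa [esBinO] using h
          · rw [hrun] at h; omega
        have hc : c = "0" ∨ c = "1" := by simpa [esBin] using hbin
        rcases hc with rfl | rfl
        · have ea : vglStep (PySem.Dict.ofList [("0", z), ("1", o)], some "0", 3) "0"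
              = (PySem.Dict.ofList [("0", z + 1), ("1", o)], some "0", 4) := rfl
          have eb : contarStep ((0, 0), some "0", 3) "0" = ((1, 0), some "0", 4) := rfl
          rw [ea, eb, ih (z + 1) o (some "0") 4 hbr'
            (Or.inl (by simp [esBinO, esBin])),
            contar_shift l 1 0 (some "0") 4]
          simp [add_assoc]
        · have ea : vglStep (PySem.Dict.ofList [("0", z), ("1", o)], some "1", 3) "1"
              = (PySem.Dict.ofList [("0", z), ("1", o + 1)], some "1", 4) := rfl
          have eb : contarStep ((0, 0), some "1", 3) "1" = ((0, 1), some "1", 4) := rfl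
          rw [ea, eb, ih z (o + 1) (some "1") 4 hbr'
            (Or.inl (by simp [esBinO, esBin])),
            contar_shift l 0 1 (some "1") 4]
          simp [add_assoc]
      · -- cantidad below 4
        have ea : vglStep (PySem.Dict.ofList [("0", z), ("1", o)], some c, k) c
            = (PySem.Dict.ofList [("0", z), ("1", o)], some c, k + 1) := by
          simp [vglStep, h4]
        have eb : contarStep ((0, 0), some c, k) c = ((0, 0), some c, k + 1) := by
          simp [contarStep, h4]
        have hinv' : esBinO (some c) = true ∨ (k + 1) + (runLenO (some c) l : Int) < 4 := by
          rcases hinv with h | h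
          · exact Or.inl h
          · rw [hrun] at h; right; push_cast at h ⊢; omega
        rw [ea, eb, ih z o (some c) (k + 1) hbr' hinv']

theorem runLenO_none (l : List String) : runLenO none l = 0 := by
  cases l <;> simp [runLenO]

theorem vgl_eq (l : List String) (h : badRunF l = false) :
    verificarGanadoresLista l = PySem.Dict.ofList [("0", (contar l).1), ("1", (contar l).2)] := by
  unfold verificarGanadoresLista
  rw [counter_fold l 0 0 none 0 h (Or.inr (by rw [runLenO_none]; omega))]
  simp [contar]

-- ---- line-list folds ----

def S0 (L : List (List String)) : Int := (L.map (fun l => (contar l).1)).sum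
def S1 (L : List (List String)) : Int := (L.map (fun l => (contar l).2)).sum

theorem lines_fold (L : List (List String)) (h : ∀ l ∈ L, badRunF l = false) (z o : Int) :
    L.foldl (fun g l => addWinners g (verificarGanadoresLista l))
        (PySem.Dict.ofList [("0", z), ("1", o)])
      = PySem.Dict.ofList [("0", z + S0 L), ("1", o + S1 L)] := by
  induction L generalizing z o with
  | nil => simp [S0, S1]
  | cons l L ih =>
    simp only [List.foldl_cons]
    rw [vgl_eq l (h l (by simp))]
    have ea : addWinners (PySem.Dict.ofList [("0", z), ("1", o)])
        (PySem.Dict.ofList [("0", (contar l).1), ("1", (contar l).2)])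
        = PySem.Dict.ofList [("0", z + (contar l).1), ("1", o + (contar l).2)] := rfl
    rw [ea, ih (fun x hx => h x (by simp [hx])) (z + (contar l).1) (o + (contar l).2)]
    simp [S0, S1, add_assoc]

theorem pair_fold (L : List (List String)) (i : Int × Int) :
    L.foldl (fun p l => (p.1 + (contar l).1, p.2 + (contar l).2)) i
      = (i.1 + S0 L, i.2 + S1 L) := by
  induction L generalizing i with
  | nil => simp [S0, S1]
  | cons l L ih =>
    simp only [List.foldl_cons]
    rw [ih]
    simp [S0, S1, add_assoc]

-- ---- A's line lists in canonical form ----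

theorem obtenerColumnas_eq (t : List (List String)) (tam : Int) :
    obtenerColumnas t tam = (PySem.List.pyRange 0 (tam - 1) 1).map (colLine t tam) := by
  unfold obtenerColumnas
  simp only [PySem.List.foldl_append_singleton_eq_map, List.nil_append]
  rfl

theorem diagDRA_eq (t : List (List String)) (tam d : Int) :
    ∀ (fila : Int) (acc : List String),
      diagDRA t tam fila (fila - d) acc
        = acc ++ (PySem.List.pyRange (max fila 0) (min tam (d + tam - 1)) 1).map
            (fun f => pyCell t f (f - d)) := by
  suffices h : ∀ (n : Nat) (fila : Int) (acc : List String), (tam - fila).toNat = n →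
      diagDRA t tam fila (fila - d) acc
        = acc ++ (PySem.List.pyRange (max fila 0) (min tam (d + tam - 1)) 1).map
            (fun f => pyCell t f (f - d)) by
    intro fila acc; exact h _ fila acc rfl
  intro n
  induction n using Nat.strong_induction_on with
  | _ n ih =>
    intro fila acc hn
    rw [diagDRA]
    split
    case isTrue hcond =>
      have hrec : fila - d + 1 = (fila + 1) - d := by ring
      rw [hrec, ih (tam - (fila + 1)).toNat (by omega) (fila + 1) _ rfl]
      by_cases hf : 0 ≤ fila
      · have hmax : max fila 0 = fila := by omega
        have hmax' : max (fila + 1) 0 = fila + 1 := by omega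
        have hlt : fila < min tam (d + tam - 1) := by omega
        rw [hmax, hmax', PySem.List.pyRange_one_cons hlt]
        simp [hf]
      · have hmax : max fila 0 = max (fila + 1) 0 := by omega
        rw [hmax]
        simp [hf]
    case isFalse hcond =>
      have : min tam (d + tam - 1) ≤ max fila 0 := by omega
      rw [PySem.List.pyRange_one_eq_nil this]
      simp

theorem diagDLA_eq (t : List (List String)) (tam d : Int) :
    ∀ (fila : Int) (acc : List String),
      diagDLA t tam fila (tam - 2 - (fila - d)) acc
        = acc ++ (PySem.List.pyRange (max fila 0) (min tam (d + tam - 1)) 1).map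
            (fun f => pyCell t f (tam - 2 - (f - d))) := by
  suffices h : ∀ (n : Nat) (fila : Int) (acc : List String), (tam - fila).toNat = n →
      diagDLA t tam fila (tam - 2 - (fila - d)) acc
        = acc ++ (PySem.List.pyRange (max fila 0) (min tam (d + tam - 1)) 1).map
            (fun f => pyCell t f (tam - 2 - (f - d))) by
    intro fila acc; exact h _ fila acc rfl
  intro n
  induction n using Nat.strong_induction_on with
  | _ n ih =>
    intro fila acc hn
    rw [diagDLA]
    split
    case isTrue hcond =>
      have hrec : tam - 2 - (fila - d) - 1 = tam - 2 - ((fila + 1) - d) := by ring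
      rw [hrec, ih (tam - (fila + 1)).toNat (by omega) (fila + 1) _ rfl]
      by_cases hf : 0 ≤ fila
      · have hmax : max fila 0 = fila := by omega
        have hmax' : max (fila + 1) 0 = fila + 1 := by omega
        have hlt : fila < min tam (d + tam - 1) := by omega
        rw [hmax, hmax', PySem.List.pyRange_one_cons hlt]
        simp [hf]
      · have hmax : max fila 0 = max (fila + 1) 0 := by omega
        rw [hmax]
        simp [hf]
    case isFalse hcond =>
      have : min tam (d + tam - 1) ≤ max fila 0 := by omega
      rw [PySem.List.pyRange_one_eq_nil this]
      simp

theorem obtenerDiagonales_eq (t : List (List String)) (tam : Int) :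
    obtenerDiagonales t tam
      = (PySem.List.pyRange (-(tam - 2)) tam 1).flatMap
          (fun d => [canonDR t tam d, canonDL t tam d]) := by
  unfold obtenerDiagonales
  have hbody : (fun (diagonales : List (List String)) (filaInicial : Int) =>
      diagonales ++ [diagDRA t tam filaInicial 0 []] ++ [diagDLA t tam filaInicial (tam - 2) []])
      = fun diagonales filaInicial =>
        diagonales ++ [canonDR t tam filaInicial, canonDL t tam filaInicial] := by
    funext ds fi
    have h1 := diagDRA_eq t tam fi fi []
    have h2 := diagDLA_eq t tam fi fi []
    rw [sub_self] at h1 h2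
    rw [show tam - 2 - (0 : Int) = tam - 2 by ring] at h2
    rw [h1, h2]
    simp [canonDR, canonDL]
  rw [hbody, PySem.List.foldl_append_eq_flatMap]
  simp

-- ---- B's buckets in canonical form ----

def stream (tam : Int) : List (Int × Int) :=
  (PySem.List.pyRange 0 tam 1).flatMap
    (fun f => (PySem.List.pyRange 0 (tam - 1) 1).map (fun c => (f, c)))

theorem foldl_flatMap' {α β σ : Type} (l : List α) (g : α → List β) (step : σ → β → σ)
    (init : σ) :
    (l.flatMap g).foldl step init = l.foldl (fun s x => (g x).foldl step s) init := by
  induction l generalizing init with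
  | nil => simp
  | cons x l ih => simp [List.foldl_append, ih]

theorem window_lemma {α : Type} (g : Int → α) (lo hi : Int) :
    ∀ (a b : Int),
      (PySem.List.pyRange a b 1).flatMap (fun f => if lo ≤ f ∧ f < hi then [g f] else [])
        = (PySem.List.pyRange (max a lo) (min b hi) 1).map g := by
  suffices h : ∀ (n : Nat) (a b : Int), (b - a).toNat = n →
      (PySem.List.pyRange a b 1).flatMap (fun f => if lo ≤ f ∧ f < hi then [g f] else [])
        = (PySem.List.pyRange (max a lo) (min b hi) 1).map g by
    intro a b; exact h _ a b rfl
  intro n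
  induction n using Nat.strong_induction_on with
  | _ n ih =>
    intro a b hn
    by_cases hab : a < b
    · rw [PySem.List.pyRange_one_cons hab]
      simp only [List.flatMap_cons]
      rw [ih (b - (a + 1)).toNat (by omega) (a + 1) b rfl]
      by_cases hw : lo ≤ a ∧ a < hi
      · have hmax : max a lo = a := by omega
        have hmax' : max (a + 1) lo = a + 1 := by omega
        have hlt : a < min b hi := by omega
        rw [hmax, hmax', PySem.List.pyRange_one_cons hlt]
        simp [hw]
      · rw [if_neg hw]
        rcases not_and_or.mp hw with hlo | hhi
        · have : max a lo = max (a + 1) lo := by omega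
          rw [this]; simp
        · have e1 : min b hi ≤ max a lo := by omega
          have e2 : min b hi ≤ max (a + 1) lo := by omega
          rw [PySem.List.pyRange_one_eq_nil e1, PySem.List.pyRange_one_eq_nil e2]
          simp
    · have e0 : b ≤ a := by omega
      have e1 : min b hi ≤ max a lo := by omega
      rw [PySem.List.pyRange_one_eq_nil e0, PySem.List.pyRange_one_eq_nil e1]
      simp

-- ---- B's buckets in canonical form ----

def mstreamDR (t : List (List String)) (tam : Int) : List (Int × String) :=
  (stream tam).map (fun p => (p.1 - p.2, pyCell t p.1 p.2))

def mstreamDL (t : List (List String)) (tam : Int) : List (Int × String) :=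
  (stream tam).map (fun p => (p.1 + p.2, pyCell t p.1 p.2))

def drFold (t : List (List String)) (tam : Int) : PySem.Dict Int (List String) :=
  (mstreamDR t tam).foldl (fun dd q => dd.modify q.1 [] (· ++ [q.2])) PySem.Dict.empty

def dlFold (t : List (List String)) (tam : Int) : PySem.Dict Int (List String) :=
  (mstreamDL t tam).foldl (fun dd q => dd.modify q.1 [] (· ++ [q.2])) PySem.Dict.empty

theorem buckets_eq (t : List (List String)) (tam : Int) :
    (PySem.List.pyRange 0 tam 1).foldl
      (fun (bs : PySem.Dict Int (List String) × PySem.Dict Int (List String)) f =>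
        (PySem.List.pyRange 0 (tam - 1) 1).foldl
          (fun bs c =>
            (bs.1.modify (f - c) [] (· ++ [pyCell t f c]),
             bs.2.modify (f + c) [] (· ++ [pyCell t f c]))) bs)
      (PySem.Dict.empty, PySem.Dict.empty)
    = (drFold t tam, dlFold t tam) := by
  have h1 : (PySem.List.pyRange 0 tam 1).foldl
      (fun (bs : PySem.Dict Int (List String) × PySem.Dict Int (List String)) f =>
        (PySem.List.pyRange 0 (tam - 1) 1).foldl
          (fun bs c =>
            (bs.1.modify (f - c) [] (· ++ [pyCell t f c]),
             bs.2.modify (f + c) [] (· ++ [pyCell t f c]))) bs)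
      (PySem.Dict.empty, PySem.Dict.empty)
      = (stream tam).foldl
          (fun (bs : PySem.Dict Int (List String) × PySem.Dict Int (List String)) p =>
            (bs.1.modify (p.1 - p.2) [] (· ++ [pyCell t p.1 p.2]),
             bs.2.modify (p.1 + p.2) [] (· ++ [pyCell t p.1 p.2])))
          (PySem.Dict.empty, PySem.Dict.empty) := by
    rw [stream, foldl_flatMap']
    simp only [List.foldl_map]
  rw [h1]
  rw [PySem.List.foldl_prod_mk
    (f := fun (dd : PySem.Dict Int (List String)) (p : Int × Int) =>
      dd.modify (p.1 - p.2) [] (· ++ [pyCell t p.1 p.2]))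
    (g := fun (dd : PySem.Dict Int (List String)) (p : Int × Int) =>
      dd.modify (p.1 + p.2) [] (· ++ [pyCell t p.1 p.2]))]
  rw [drFold, dlFold, mstreamDR, mstreamDL]
  simp only [List.foldl_map]

theorem filter_sub_eq (e k : Int) :
    ∀ (a b : Int), (PySem.List.pyRange a b 1).filter (fun c => e - c == k)
      = if a ≤ e - k ∧ e - k < b then [e - k] else [] := by
  suffices h : ∀ (n : Nat) (a b : Int), (b - a).toNat = n →
      (PySem.List.pyRange a b 1).filter (fun c => e - c == k)
        = if a ≤ e - k ∧ e - k < b then [e - k] else [] by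
    intro a b; exact h _ a b rfl
  intro n
  induction n using Nat.strong_induction_on with
  | _ n ih =>
    intro a b hn
    by_cases hab : a < b
    · rw [PySem.List.pyRange_one_cons hab, List.filter_cons,
        ih (b - (a + 1)).toNat (by omega) (a + 1) b rfl]
      by_cases he : e - a = k
      · have hek : e - k = a := by omega
        simp [he, hek, hab]
      · have hne : (e - a == k) = false := by simp [he]
        rw [hne]
        simp only [Bool.false_eq_true, if_false]
        have : (a + 1 ≤ e - k ∧ e - k < b) ↔ (a ≤ e - k ∧ e - k < b) := by
          constructor <;> (intro ⟨h1, h2⟩; constructor <;> omega)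
        rw [if_congr this rfl rfl]
    · rw [PySem.List.pyRange_one_eq_nil (by omega)]
      rw [if_neg (by omega)]
      rfl

theorem filter_add_eq (e k : Int) :
    ∀ (a b : Int), (PySem.List.pyRange a b 1).filter (fun c => e + c == k)
      = if a ≤ k - e ∧ k - e < b then [k - e] else [] := by
  suffices h : ∀ (n : Nat) (a b : Int), (b - a).toNat = n →
      (PySem.List.pyRange a b 1).filter (fun c => e + c == k)
        = if a ≤ k - e ∧ k - e < b then [k - e] else [] by
    intro a b; exact h _ a b rfl
  intro n
  induction n using Nat.strong_induction_on with
  | _ n ih =>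
    intro a b hn
    by_cases hab : a < b
    · rw [PySem.List.pyRange_one_cons hab, List.filter_cons,
        ih (b - (a + 1)).toNat (by omega) (a + 1) b rfl]
      by_cases he : e + a = k
      · have hek : k - e = a := by omega
        simp [he, hek, hab]
      · have hne : (e + a == k) = false := by simp [he]
        rw [hne]
        simp only [Bool.false_eq_true, if_false]
        have : (a + 1 ≤ k - e ∧ k - e < b) ↔ (a ≤ k - e ∧ k - e < b) := by
          constructor <;> (intro ⟨h1, h2⟩; constructor <;> omega)
        rw [if_congr this rfl rfl]
    · rw [PySem.List.pyRange_one_eq_nil (by omega)]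
      rw [if_neg (by omega)]
      rfl

theorem map_flatMap'' {α β γ : Type} (l : List α) (g : α → List β) (f : β → γ) :
    (l.flatMap g).map f = l.flatMap (fun a => (g a).map f) := by
  induction l with
  | nil => simp
  | cons x l ih => simp [ih]

theorem filter_flatMap'' {α β : Type} (l : List α) (g : α → List β) (p : β → Bool) :
    (l.flatMap g).filter p = l.flatMap (fun a => (g a).filter p) := by
  induction l with
  | nil => simp
  | cons x l ih => simp [List.filter_append, ih]

theorem drFold_getD (t : List (List String)) (tam k : Int) :
    (drFold t tam).getD k [] = canonDR t tam k := by
  rw [drFold, PySem.Dict.getD_foldl_modify_append]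
  rw [PySem.Dict.getD_empty, List.nil_append]
  rw [mstreamDR, stream, map_flatMap'', filter_flatMap'', map_flatMap'']
  have hin : ∀ f : Int,
      (((((PySem.List.pyRange 0 (tam - 1) 1).map (fun c => (f, c))).map
        (fun p => (p.1 - p.2, pyCell t p.1 p.2))).filter (fun q => q.1 == k)).map (·.2))
      = if k ≤ f ∧ f < k + (tam - 1) then [pyCell t f (f - k)] else [] := by
    intro f
    rw [List.map_map, List.filter_map, List.map_map]
    have : ((PySem.List.pyRange 0 (tam - 1) 1).filter
        ((fun q : Int × String => q.1 == k) ∘ ((fun p : Int × Int => (p.1 - p.2, pyCell t p.1 p.2)) ∘ fun c => (f, c))))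
        = (PySem.List.pyRange 0 (tam - 1) 1).filter (fun c => f - c == k) := rfl
    rw [this, filter_sub_eq f k 0 (tam - 1)]
    by_cases hc : 0 ≤ f - k ∧ f - k < tam - 1
    · rw [if_pos hc, if_pos (by omega)]
      simp
    · rw [if_neg hc, if_neg (by omega)]
      simp
  rw [show (fun f => (((((PySem.List.pyRange 0 (tam - 1) 1).map (fun c => (f, c))).map
        (fun p => (p.1 - p.2, pyCell t p.1 p.2))).filter (fun q => q.1 == k)).map (·.2)))
      = fun f => if k ≤ f ∧ f < k + (tam - 1) then [pyCell t f (f - k)] else []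
    from funext hin]
  rw [window_lemma (fun f => pyCell t f (f - k)) k (k + (tam - 1)) 0 tam]
  rw [canonDR, show max (0 : Int) k = max k 0 from max_comm 0 k,
    show k + (tam - 1) = k + tam - 1 by ring]

theorem dlFold_getD (t : List (List String)) (tam k : Int) :
    (dlFold t tam).getD k [] = canonDL t tam (k - (tam - 2)) := by
  rw [dlFold, PySem.Dict.getD_foldl_modify_append]
  rw [PySem.Dict.getD_empty, List.nil_append]
  rw [mstreamDL, stream, map_flatMap'', filter_flatMap'', map_flatMap'']
  have hin : ∀ f : Int,
      (((((PySem.List.pyRange 0 (tam - 1) 1).map (fun c => (f, c))).map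
        (fun p => (p.1 + p.2, pyCell t p.1 p.2))).filter (fun q => q.1 == k)).map (·.2))
      = if k - tam + 2 ≤ f ∧ f < k + 1 then [pyCell t f (k - f)] else [] := by
    intro f
    rw [List.map_map, List.filter_map, List.map_map]
    have : ((PySem.List.pyRange 0 (tam - 1) 1).filter
        ((fun q : Int × String => q.1 == k) ∘ ((fun p : Int × Int => (p.1 + p.2, pyCell t p.1 p.2)) ∘ fun c => (f, c))))
        = (PySem.List.pyRange 0 (tam - 1) 1).filter (fun c => f + c == k) := rfl
    rw [this, filter_add_eq f k 0 (tam - 1)]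
    by_cases hc : 0 ≤ k - f ∧ k - f < tam - 1
    · rw [if_pos hc, if_pos (by omega)]
      simp
    · rw [if_neg hc, if_neg (by omega)]
      simp
  rw [show (fun f => (((((PySem.List.pyRange 0 (tam - 1) 1).map (fun c => (f, c))).map
        (fun p => (p.1 + p.2, pyCell t p.1 p.2))).filter (fun q => q.1 == k)).map (·.2)))
      = fun f => if k - tam + 2 ≤ f ∧ f < k + 1 then [pyCell t f (k - f)] else []
    from funext hin]
  rw [window_lemma (fun f => pyCell t f (k - f)) (k - tam + 2) (k + 1) 0 tam]
  rw [canonDL, show max (0 : Int) (k - tam + 2) = max (k - (tam - 2)) 0 by omega,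
    show k - (tam - 2) + tam - 1 = k + 1 by ring]
  congr 1
  funext f
  congr 1
  ring

theorem drFold_keys (t : List (List String)) (tam : Int) :
    (drFold t tam).keys = PySem.Set.ofList ((mstreamDR t tam).map (·.1)) := by
  rw [drFold, PySem.Dict.keys_foldl_modify_key (key := fun q : Int × String => q.1)
    (f := fun _ q => (· ++ [q.2]))]
  rw [PySem.Dict.keys_empty, PySem.Set.update_nil_left]

theorem dlFold_keys (t : List (List String)) (tam : Int) :
    (dlFold t tam).keys = PySem.Set.ofList ((mstreamDL t tam).map (·.1)) := by
  rw [dlFold, PySem.Dict.keys_foldl_modify_key (key := fun q : Int × String => q.1)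
    (f := fun _ q => (· ++ [q.2]))]
  rw [PySem.Dict.keys_empty, PySem.Set.update_nil_left]

theorem mem_stream_iff (tam : Int) (p : Int × Int) :
    p ∈ stream tam ↔ 0 ≤ p.1 ∧ p.1 < tam ∧ 0 ≤ p.2 ∧ p.2 < tam - 1 := by
  rcases p with ⟨f, c⟩
  rw [stream, List.mem_flatMap]
  constructor
  · rintro ⟨f', hf', hmem⟩
    rw [List.mem_map] at hmem
    obtain ⟨c', hc', heq⟩ := hmem
    obtain ⟨rfl, rfl⟩ : f' = f ∧ c' = c := by
      constructor <;> · have := congrArg Prod.fst heq <;> first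
        | exact (Prod.mk.injEq _ _ _ _ ▸ heq : _ ∧ _).1
        | exact (Prod.mk.injEq _ _ _ _ ▸ heq : _ ∧ _).2
    rw [PySem.List.mem_pyRange_one] at hf'
    rw [PySem.List.mem_pyRange_one] at hc'
    exact ⟨hf'.1, hf'.2, hc'.1, hc'.2⟩
  · rintro ⟨h1, h2, h3, h4⟩
    refine ⟨f, ?_, ?_⟩
    · rw [PySem.List.mem_pyRange_one]; exact ⟨h1, h2⟩
    · rw [List.mem_map]
      exact ⟨c, by rw [PySem.List.mem_pyRange_one]; exact ⟨h3, h4⟩, rfl⟩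

theorem keysDR_perm (t : List (List String)) (tam : Int) :
    (PySem.Set.ofList ((mstreamDR t tam).map (·.1))).Perm
      (PySem.List.pyRange (-(tam - 2)) tam 1) := by
  rw [(List.perm_ext_iff_of_nodup (PySem.Set.nodup_ofList _)
    (PySem.List.nodup_pyRange_one _ _))]
  intro k
  rw [PySem.Set.mem_ofList, PySem.List.mem_pyRange_one]
  rw [mstreamDR, List.map_map, List.mem_map]
  simp only [Function.comp_def]
  constructor
  · rintro ⟨p, hp, rfl⟩
    rw [mem_stream_iff] at hp
    omega
  · intro hk
    by_cases h0 : 0 ≤ k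
    · exact ⟨(k, 0), (mem_stream_iff tam (k, 0)).mpr (by refine ⟨?_, ?_, ?_, ?_⟩ <;> omega),
        by omega⟩
    · exact ⟨(0, -k), (mem_stream_iff tam (0, -k)).mpr (by refine ⟨?_, ?_, ?_, ?_⟩ <;> omega),
        by omega⟩

theorem keysDL_perm (t : List (List String)) (tam : Int) :
    (PySem.Set.ofList ((mstreamDL t tam).map (·.1))).Perm
      ((PySem.List.pyRange (-(tam - 2)) tam 1).map (· + (tam - 2))) := by
  rw [(List.perm_ext_iff_of_nodup (PySem.Set.nodup_ofList _)
    ((PySem.List.nodup_pyRange_one _ _).map (fun a b h => by omega)))]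
  intro k
  rw [PySem.Set.mem_ofList]
  rw [mstreamDL, List.map_map, List.mem_map, List.mem_map]
  simp only [Function.comp_def]
  constructor
  · rintro ⟨p, hp, rfl⟩
    rw [mem_stream_iff] at hp
    refine ⟨p.1 + p.2 - (tam - 2), ?_, by ring⟩
    rw [PySem.List.mem_pyRange_one]
    omega
  · rintro ⟨d, hd, rfl⟩
    rw [PySem.List.mem_pyRange_one] at hd
    by_cases hsm : d + (tam - 2) ≤ tam - 1
    · exact ⟨(d + (tam - 2), 0),
        (mem_stream_iff tam _).mpr (by refine ⟨?_, ?_, ?_, ?_⟩ <;> omega), by omega⟩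
    · exact ⟨(tam - 1, d + (tam - 2) - (tam - 1)),
        (mem_stream_iff tam _).mpr (by refine ⟨?_, ?_, ?_, ?_⟩ <;> omega), by omega⟩

theorem drFold_values (t : List (List String)) (tam : Int) :
    (drFold t tam).values
      = (PySem.Set.ofList ((mstreamDR t tam).map (·.1))).map (fun k => canonDR t tam k) := by
  rw [PySem.Dict.values_eq_map_keys _ (by rw [drFold_keys]; exact PySem.Set.nodup_ofList _) []]
  rw [drFold_keys]
  apply List.map_congr_left
  intro k _
  exact drFold_getD t tam k

theorem dlFold_values (t : List (List String)) (tam : Int) :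
    (dlFold t tam).values
      = (PySem.Set.ofList ((mstreamDL t tam).map (·.1))).map
          (fun k => canonDL t tam (k - (tam - 2))) := by
  rw [PySem.Dict.values_eq_map_keys _ (by rw [dlFold_keys]; exact PySem.Set.nodup_ofList _) []]
  rw [dlFold_keys]
  apply List.map_congr_left
  intro k _
  exact dlFold_getD t tam k

-- ---- assembly ----

theorem sum_proj_flatMap (l : List Int) (u v : Int → List String) (pr : List String → Int) :
    ((l.flatMap (fun d => [u d, v d])).map pr).sum
      = (l.map (fun d => pr (u d))).sum + (l.map (fun d => pr (v d))).sum := by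
  induction l with
  | nil => simp
  | cons d l ih => simp [ih]; ring

theorem pre_parts (t : List (List String)) (tam : Int)
    (hp : Pre_verificarGanadores t tam) :
    (∀ row ∈ t, badRunF row = false) ∧
    (∀ c ∈ PySem.List.pyRange 0 (tam - 1) 1, badRunF (colLine t tam c) = false) ∧
    (∀ d ∈ PySem.List.pyRange (-(tam - 2)) tam 1,
      badRunF (canonDR t tam d) = false ∧ badRunF (canonDL t tam d) = false) := by
  obtain ⟨h1, h2⟩ := hp
  refine ⟨h1, ?_, ?_⟩ <;>
  · by_cases htam : 2 ≤ tam
    · rw [if_pos htam] at h2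
      split at h2
      · first
        | exact h2.1
        | exact h2.2
      · exact h2.elim
    · intro x hx
      rw [PySem.List.mem_pyRange_one] at hx
      omega

theorem items_dict2 (a b : Int) :
    (PySem.Dict.ofList [("0", a), ("1", b)]).items = [("0", a), ("1", b)] := rfl

theorem A_total (t : List (List String)) (tam : Int)
    (hrows : ∀ row ∈ t, badRunF row = false)
    (hcols : ∀ c ∈ PySem.List.pyRange 0 (tam - 1) 1, badRunF (colLine t tam c) = false)
    (hdiag : ∀ d ∈ PySem.List.pyRange (-(tam - 2)) tam 1,
      badRunF (canonDR t tam d) = false ∧ badRunF (canonDL t tam d) = false) :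
    verificarGanadores t tam
      = [("0", S0 t + S0 ((PySem.List.pyRange 0 (tam - 1) 1).map (colLine t tam))
            + (((PySem.List.pyRange (-(tam - 2)) tam 1).map
                (fun d => (contar (canonDR t tam d)).1)).sum
              + ((PySem.List.pyRange (-(tam - 2)) tam 1).map
                (fun d => (contar (canonDL t tam d)).1)).sum)),
         ("1", S1 t + S1 ((PySem.List.pyRange 0 (tam - 1) 1).map (colLine t tam))
            + (((PySem.List.pyRange (-(tam - 2)) tam 1).map
                (fun d => (contar (canonDR t tam d)).2)).sum
              + ((PySem.List.pyRange (-(tam - 2)) tam 1).map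
                (fun d => (contar (canonDL t tam d)).2)).sum))] := by
  rw [show verificarGanadores t tam
      = ((obtenerDiagonales t tam).foldl (fun g diagonal => addWinners g (verificarGanadoresLista diagonal))
          ((obtenerColumnas t tam).foldl (fun g columna => addWinners g (verificarGanadoresLista columna))
            (t.foldl (fun g fila => addWinners g (verificarGanadoresLista fila))
              (PySem.Dict.ofList [("0", 0), ("1", 0)])))).items from rfl]
  rw [obtenerColumnas_eq, obtenerDiagonales_eq]
  rw [lines_fold t hrows 0 0]
  rw [lines_fold _ (fun l hl => by
    obtain ⟨c, hc, rfl⟩ := List.mem_map.mp hl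
    exact hcols c hc) _ _]
  rw [lines_fold _ (fun l hl => by
    obtain ⟨d, hd, hor⟩ := List.mem_flatMap.mp hl
    simp only [List.mem_cons, List.not_mem_nil, or_false] at hor
    rcases hor with rfl | rfl
    · exact (hdiag d hd).1
    · exact (hdiag d hd).2) _ _]
  rw [items_dict2]
  have hS0 : S0 ((PySem.List.pyRange (-(tam - 2)) tam 1).flatMap
      (fun d => [canonDR t tam d, canonDL t tam d]))
      = ((PySem.List.pyRange (-(tam - 2)) tam 1).map
          (fun d => (contar (canonDR t tam d)).1)).sum
        + ((PySem.List.pyRange (-(tam - 2)) tam 1).map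
          (fun d => (contar (canonDL t tam d)).1)).sum := by
    rw [S0]
    exact sum_proj_flatMap _ _ _ _
  have hS1 : S1 ((PySem.List.pyRange (-(tam - 2)) tam 1).flatMap
      (fun d => [canonDR t tam d, canonDL t tam d]))
      = ((PySem.List.pyRange (-(tam - 2)) tam 1).map
          (fun d => (contar (canonDR t tam d)).2)).sum
        + ((PySem.List.pyRange (-(tam - 2)) tam 1).map
          (fun d => (contar (canonDL t tam d)).2)).sum := by
    rw [S1]
    exact sum_proj_flatMap _ _ _ _
  rw [hS0, hS1]
  simp [add_assoc]

-- zeta-reduced restatement of verificarGanadores_alt's let chain (proof plumbing only)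
def pvRows (t : List (List String)) : Int × Int :=
  t.foldl (fun p fila => (p.1 + (contar fila).1, p.2 + (contar fila).2)) (0, 0)

def pvCols (t : List (List String)) (tam : Int) : Int × Int :=
  (PySem.List.pyRange 0 (tam - 1) 1).foldl
    (fun p columna =>
      (p.1 + (contar ((PySem.List.pyRange 0 tam 1).map (fun f => pyCell t f columna))).1,
       p.2 + (contar ((PySem.List.pyRange 0 tam 1).map (fun f => pyCell t f columna))).2))
    (pvRows t)

def pvBuckets (t : List (List String)) (tam : Int) :
    PySem.Dict Int (List String) × PySem.Dict Int (List String) :=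
  (PySem.List.pyRange 0 tam 1).foldl
    (fun (bs : PySem.Dict Int (List String) × PySem.Dict Int (List String)) f =>
      (PySem.List.pyRange 0 (tam - 1) 1).foldl
        (fun bs c =>
          (bs.1.modify (f - c) [] (· ++ [pyCell t f c]),
           bs.2.modify (f + c) [] (· ++ [pyCell t f c]))) bs)
    (PySem.Dict.empty, PySem.Dict.empty)

def pvZo3 (t : List (List String)) (tam : Int) : Int × Int :=
  (pvBuckets t tam).1.values.foldl
    (fun p b => (p.1 + (contar b).1, p.2 + (contar b).2)) (pvCols t tam)

def pvZo4 (t : List (List String)) (tam : Int) : Int × Int :=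
  (pvBuckets t tam).2.values.foldl
    (fun p b => (p.1 + (contar b).1, p.2 + (contar b).2)) (pvZo3 t tam)

theorem B_total (t : List (List String)) (tam : Int) :
    verificarGanadores_alt t tam
      = [("0", S0 t + S0 ((PySem.List.pyRange 0 (tam - 1) 1).map (colLine t tam))
            + (((PySem.List.pyRange (-(tam - 2)) tam 1).map
                (fun d => (contar (canonDR t tam d)).1)).sum
              + ((PySem.List.pyRange (-(tam - 2)) tam 1).map
                (fun d => (contar (canonDL t tam d)).1)).sum)),
         ("1", S1 t + S1 ((PySem.List.pyRange 0 (tam - 1) 1).map (colLine t tam))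
            + (((PySem.List.pyRange (-(tam - 2)) tam 1).map
                (fun d => (contar (canonDR t tam d)).2)).sum
              + ((PySem.List.pyRange (-(tam - 2)) tam 1).map
                (fun d => (contar (canonDL t tam d)).2)).sum))] := by
  rw [show verificarGanadores_alt t tam
      = [("0", (pvZo4 t tam).1), ("1", (pvZo4 t tam).2)] from rfl]
  simp only [pvZo4, pvZo3, pvCols, pvRows, pvBuckets]
  rw [buckets_eq]
  rw [pair_fold t (0, 0)]
  have hcols : (PySem.List.pyRange 0 (tam - 1) 1).foldl
      (fun (p : Int × Int) columna =>
        (p.1 + (contar ((PySem.List.pyRange 0 tam 1).map (fun f => pyCell t f columna))).1,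
         p.2 + (contar ((PySem.List.pyRange 0 tam 1).map (fun f => pyCell t f columna))).2))
      (0 + S0 t, 0 + S1 t)
      = (0 + S0 t + S0 ((PySem.List.pyRange 0 (tam - 1) 1).map (colLine t tam)),
         0 + S1 t + S1 ((PySem.List.pyRange 0 (tam - 1) 1).map (colLine t tam))) := by
    rw [← pair_fold ((PySem.List.pyRange 0 (tam - 1) 1).map (colLine t tam)) (0 + S0 t, 0 + S1 t)]
    rw [List.foldl_map]
    rfl
  rw [hcols]
  rw [drFold_values, dlFold_values]
  rw [pair_fold, pair_fold]
  have hdr0 : S0 ((PySem.Set.ofList ((mstreamDR t tam).map (·.1))).map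
      (fun k => canonDR t tam k))
      = ((PySem.List.pyRange (-(tam - 2)) tam 1).map
          (fun d => (contar (canonDR t tam d)).1)).sum := by
    rw [S0, List.map_map]
    exact ((keysDR_perm t tam).map _).sum_eq
  have hdr1 : S1 ((PySem.Set.ofList ((mstreamDR t tam).map (·.1))).map
      (fun k => canonDR t tam k))
      = ((PySem.List.pyRange (-(tam - 2)) tam 1).map
          (fun d => (contar (canonDR t tam d)).2)).sum := by
    rw [S1, List.map_map]
    exact ((keysDR_perm t tam).map _).sum_eq
  have hdlgen : ∀ pr : Int × Int → Int,
      ((PySem.Set.ofList ((mstreamDL t tam).map (·.1))).map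
        (fun k => pr (contar (canonDL t tam (k - (tam - 2)))))).sum
      = ((PySem.List.pyRange (-(tam - 2)) tam 1).map
          (fun d => pr (contar (canonDL t tam d)))).sum := by
    intro pr
    rw [((keysDL_perm t tam).map _).sum_eq, List.map_map]
    apply congrArg
    apply List.map_congr_left
    intro d _
    simp [Function.comp]
  have hdl0 : S0 ((PySem.Set.ofList ((mstreamDL t tam).map (·.1))).map
      (fun k => canonDL t tam (k - (tam - 2))))
      = ((PySem.List.pyRange (-(tam - 2)) tam 1).map
          (fun d => (contar (canonDL t tam d)).1)).sum := by
    rw [S0, List.map_map]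
    exact hdlgen (fun x => x.1)
  have hdl1 : S1 ((PySem.Set.ofList ((mstreamDL t tam).map (·.1))).map
      (fun k => canonDL t tam (k - (tam - 2))))
      = ((PySem.List.pyRange (-(tam - 2)) tam 1).map
          (fun d => (contar (canonDL t tam d)).2)).sum := by
    rw [S1, List.map_map]
    exact hdlgen (fun x => x.2)
  rw [hdr0, hdr1, hdl0, hdl1]
  simp [add_assoc]

-- ===== VERDICT (by name: the statement is the Claim_ definition above) =====
theorem verificarGanadores_spec : Claim_equal_verificarGanadores := by
  intro t tam _hdom hpre
  obtain ⟨hrows, hcols, hdiag⟩ := pre_parts t tam hpre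
  unfold Spec_verificarGanadores
  rw [A_total t tam hrows hcols hdiag, B_total t tam]
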